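-- pv_equiv track=rewrite | github.com/B022MC/journal | backend/scripts/render_remote_journal_configs.py | rewrite_rpc_clients_to_direct
-- ===== SOURCE A (Python) =====
-- DIRECT_RPC_ENDPOINTS = {
--     "UserRpc": "127.0.0.1:9001",
--     "PaperRpc": "127.0.0.1:9002",
--     "RatingRpc": "127.0.0.1:9003",
--     "NewsRpc": "127.0.0.1:9004",
--     "AdminRpc": "127.0.0.1:9005",
-- }
--
-- def rewrite_rpc_clients_to_direct(text: str) -> str:
--     lines = text.splitlines()
--     output: list[str] = []
--     index = 0
--
--     while index < len(lines):
--         line = lines[index]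
--         stripped = line.strip()
--         if stripped.endswith(":") and stripped[:-1] in DIRECT_RPC_ENDPOINTS and not line.startswith(" "):
--             block_name = stripped[:-1]
--             endpoint = DIRECT_RPC_ENDPOINTS[block_name]
--             output.append(line)
--             index += 1
--             inserted_endpoints = False
--
--             while index < len(lines):
--                 child = lines[index]
--                 if child and not child.startswith("  "):
--                     break
--
--                 child_stripped = child.strip()
--                 if child.startswith("  Etcd:"):
--                     if not inserted_endpoints:
--                         output.append("  Endpoints:")
--                         output.append(f"    - {endpoint}")
--                         inserted_endpoints = True
--                     index += 1
--                     while index < len(lines):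
--                         grandchild = lines[index]
--                         if grandchild and not grandchild.startswith("    "):
--                             break
--                         index += 1
--                     continue
--
--                 if not inserted_endpoints and child_stripped.startswith("Timeout:"):
--                     output.append("  Endpoints:")
--                     output.append(f"    - {endpoint}")
--                     inserted_endpoints = True
--
--                 output.append(child)
--                 index += 1
--
--             if not inserted_endpoints:
--                 output.append("  Endpoints:")
--                 output.append(f"    - {endpoint}")
--             continue
--
--         output.append(line)
--         index += 1
--
--     return "\n".join(output) + "\n"
-- ===== SOURCE B (Python) =====
-- DIRECT_RPC_ENDPOINTS = {
--     "UserRpc": "127.0.0.1:9001",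
--     "PaperRpc": "127.0.0.1:9002",
--     "RatingRpc": "127.0.0.1:9003",
--     "NewsRpc": "127.0.0.1:9004",
--     "AdminRpc": "127.0.0.1:9005",
-- }
--
--
-- def _is_header(line):
--     stripped = line.strip()
--     return (not line.startswith(" ")) and stripped.endswith(":") and stripped[:-1] in DIRECT_RPC_ENDPOINTS
--
--
-- def _in_body(line):
--     return line == "" or line.startswith("  ")
--
--
-- def _segments(lines):
--     """Group lines into segments: (line, None) for plain lines, (header, body) for RPC blocks."""
--     segments = []
--     rest = lines
--     while rest:
--         line = rest[0]
--         if _is_header(line):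
--             body = []
--             rest = rest[1:]
--             while rest and _in_body(rest[0]):
--                 body.append(rest[0])
--                 rest = rest[1:]
--             segments.append((line, body))
--         else:
--             segments.append((line, None))
--             rest = rest[1:]
--     return segments
--
--
-- def _filter_body(body):
--     """Drop Etcd sections; return (kept lines, insertion index or None)."""
--     filtered = []
--     pos = None
--     rest = body
--     while rest:
--         line = rest[0]
--         if line.startswith("  Etcd:"):
--             if pos is None:
--                 pos = len(filtered)
--             rest = rest[1:]
--             while rest and (rest[0] == "" or rest[0].startswith("    ")):
--                 rest = rest[1:]
--         else:
--             if pos is None and line.strip().startswith("Timeout:"):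
--                 pos = len(filtered)
--             filtered.append(line)
--             rest = rest[1:]
--     return filtered, pos
--
--
-- def _transform(body, endpoint):
--     filtered, pos = _filter_body(body)
--     if pos is None:
--         pos = len(filtered)
--     return filtered[:pos] + ["  Endpoints:", f"    - {endpoint}"] + filtered[pos:]
--
--
-- def rewrite_rpc_clients_to_direct(text: str) -> str:
--     out = []
--     for line, body in _segments(text.splitlines()):
--         out.append(line)
--         if body is not None:
--             endpoint = DIRECT_RPC_ENDPOINTS[line.strip()[:-1]]
--             out.extend(_transform(body, endpoint))
--     return "\n".join(out) + "\n"
-- ===== Notes on version B (the rewrite author's own statement) =====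
-- stated objective: alternative
-- what changed: A's single interleaved index-advancing scan (insertion flag, inline emission, nested skip loops over one shared index) is replaced by a group-then-transform pipeline: lines are first segmented into plain lines and RPC blocks (header plus captured body), then each block body is filtered of Etcd sections in one pass that records the insertion index, and the two Endpoints lines are spliced in at that index.
import Mathlib
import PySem

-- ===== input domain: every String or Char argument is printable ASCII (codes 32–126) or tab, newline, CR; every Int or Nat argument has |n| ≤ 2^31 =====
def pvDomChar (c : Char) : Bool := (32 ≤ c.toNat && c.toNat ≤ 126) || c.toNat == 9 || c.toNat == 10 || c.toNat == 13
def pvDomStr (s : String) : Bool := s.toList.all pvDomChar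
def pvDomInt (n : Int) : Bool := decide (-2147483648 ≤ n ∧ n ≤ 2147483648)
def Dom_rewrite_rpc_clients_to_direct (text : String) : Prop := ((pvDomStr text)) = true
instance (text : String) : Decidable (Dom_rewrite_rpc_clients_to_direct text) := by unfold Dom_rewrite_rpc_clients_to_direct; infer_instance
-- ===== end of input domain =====

-- B replaces A's single interleaved index-advancing scan (insertion flag, inline emission) by a
-- group-then-transform pipeline: segment lines into plain lines / RPC blocks, filter each block body
-- of Etcd sections while recording the insertion index, and splice the Endpoints lines in (objective: alternative).

-- the module-level DIRECT_RPC_ENDPOINTS dict (shared data of both sources)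
def pvDirect : PySem.Dict String String :=
  PySem.Dict.ofList [("UserRpc","127.0.0.1:9001"),("PaperRpc","127.0.0.1:9002"),
    ("RatingRpc","127.0.0.1:9003"),("NewsRpc","127.0.0.1:9004"),("AdminRpc","127.0.0.1:9005")]

-- ===== PORT A =====
-- the innermost grandchild-skipping while loop
def aSkipGrand : List String → List String
  | [] => []
  | g :: rest => if g ≠ "" ∧ PySem.Str.startswith g "    " = false then g :: rest else aSkipGrand rest

theorem aSkipGrand_length_le (l : List String) : (aSkipGrand l).length ≤ l.length := by
  induction l with
  | nil => simp [aSkipGrand]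
  | cons g rest ih =>
    simp only [aSkipGrand]
    split
    · exact Nat.le_refl _
    · exact Nat.le_trans ih (Nat.le_succ _)

-- the middle while loop: returns (lines emitted, inserted flag, remaining lines)
def aInner (ep : String) (inserted : Bool) : List String → List String × Bool × List String
  | [] => ([], inserted, [])
  | child :: rest =>
    if child ≠ "" ∧ PySem.Str.startswith child "  " = false then
      ([], inserted, child :: rest)
    else if PySem.Str.startswith child "  Etcd:" then
      let pre : List String := if inserted then [] else ["  Endpoints:", "    - " ++ ep]
      let r := aInner ep true (aSkipGrand rest)
      (pre ++ r.1, r.2.1, r.2.2)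
    else
      let hit := inserted = false ∧ PySem.Str.startswith (PySem.Str.strip child) "Timeout:" = true
      let pre : List String := if hit then ["  Endpoints:", "    - " ++ ep] else []
      let ins2 : Bool := if hit then true else inserted
      let r := aInner ep ins2 rest
      (pre ++ child :: r.1, r.2.1, r.2.2)
termination_by l => l.length
decreasing_by
  · exact Nat.lt_succ_of_le (aSkipGrand_length_le rest)
  · exact Nat.lt_succ_self _

theorem aInner_rem_length_le (ep : String) :
    ∀ (inserted : Bool) (l : List String), (aInner ep inserted l).2.2.length ≤ l.length := by
  intro inserted l
  induction inserted, l using aInner.induct ep with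
  | case1 inserted => simp [aInner]
  | case2 inserted child rest hbrk =>
    simp only [aInner, if_pos hbrk]
    exact Nat.le_refl _
  | case3 inserted child rest hbrk hetcd ih =>
    simp only [aInner, if_neg hbrk, if_pos hetcd]
    exact Nat.le_trans (Nat.le_trans ih (aSkipGrand_length_le rest)) (Nat.le_succ _)
  | case4 inserted child rest hbrk hetcd hit ins2 ih =>
    simp only [aInner, if_neg hbrk, if_neg hetcd]
    exact Nat.le_trans ih (Nat.le_succ _)

-- the outer while loop
def aOuter : List String → List String
  | [] => []
  | line :: rest =>
    let stripped := PySem.Str.strip line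
    if PySem.Str.endswith stripped ":" = true ∧
        (pvDirect.get? (PySem.Str.slice stripped none (some (-1)))).isSome = true ∧
        PySem.Str.startswith line " " = false then
      -- key present by the guard, so getD "" is Python's DIRECT_RPC_ENDPOINTS[block_name]
      let ep := (pvDirect.get? (PySem.Str.slice stripped none (some (-1)))).getD ""
      let r := aInner ep false rest
      line :: (r.1 ++ (if r.2.1 then [] else ["  Endpoints:", "    - " ++ ep]) ++ aOuter r.2.2)
    else
      line :: aOuter rest
termination_by l => l.length
decreasing_by
  · exact Nat.lt_succ_of_le (aInner_rem_length_le _ _ rest)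
  · exact Nat.lt_succ_self _

def rewrite_rpc_clients_to_direct (text : String) : String :=
  PySem.Str.join "\n" (aOuter (PySem.Str.splitlines text)) ++ "\n"

-- ===== PORT B =====
def bIsHeader (line : String) : Bool :=
  let stripped := PySem.Str.strip line
  !(PySem.Str.startswith line " ") && PySem.Str.endswith stripped ":" &&
    (pvDirect.get? (PySem.Str.slice stripped none (some (-1)))).isSome

def bInBody (line : String) : Bool := line == "" || PySem.Str.startswith line "  "

-- pass 1: group lines into segments: (line, none) = plain line, (header, some body) = RPC block
def bSegments : List String → List (String × Option (List String))
  | [] => []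
  | line :: rest =>
    if bIsHeader line then
      (line, some (rest.takeWhile bInBody)) :: bSegments (rest.dropWhile bInBody)
    else
      (line, none) :: bSegments rest
termination_by l => l.length
decreasing_by
  · exact Nat.lt_succ_of_le (List.length_dropWhile_le _ _)
  · exact Nat.lt_succ_self _

-- drop Etcd sections from a block body; record the insertion index (first Etcd / Timeout point)
def bFilterLoop : List String → List String → Option Nat → List String × Option Nat
  | [], filtered, pos => (filtered, pos)
  | line :: rest, filtered, pos =>
    if PySem.Str.startswith line "  Etcd:" then
      let pos2 := if pos.isNone then some filtered.length else pos
      bFilterLoop (rest.dropWhile (fun g => g == "" || PySem.Str.startswith g "    ")) filtered pos2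
    else
      let pos2 := if pos.isNone ∧ PySem.Str.startswith (PySem.Str.strip line) "Timeout:" = true then
          some filtered.length else pos
      bFilterLoop rest (filtered ++ [line]) pos2
termination_by l => l.length
decreasing_by
  · exact Nat.lt_succ_of_le (List.length_dropWhile_le _ _)
  · exact Nat.lt_succ_self _

def bTransform (body : List String) (ep : String) : List String :=
  let r := bFilterLoop body [] none
  let pos := r.2.getD r.1.length
  r.1.take pos ++ ["  Endpoints:", "    - " ++ ep] ++ r.1.drop pos

-- pass 2: emit segments
def bEmit : List (String × Option (List String)) → List String
  | [] => []
  | (line, none) :: segs => line :: bEmit segs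
  | (line, some body) :: segs =>
    let ep := (pvDirect.get? (PySem.Str.slice (PySem.Str.strip line) none (some (-1)))).getD ""
    (line :: bTransform body ep) ++ bEmit segs

def rewrite_rpc_clients_to_direct_alt (text : String) : String :=
  PySem.Str.join "\n" (bEmit (bSegments (PySem.Str.splitlines text))) ++ "\n"

-- ===== PRECONDITION & SPEC =====
def Spec_rewrite_rpc_clients_to_direct (text : String) (out : String) : Prop := out = rewrite_rpc_clients_to_direct_alt text
instance (text : String) (out : String) : Decidable (Spec_rewrite_rpc_clients_to_direct text out) := by unfold Spec_rewrite_rpc_clients_to_direct; infer_instance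

-- ===== CLAIM (what is proved, stated in full; the proofs are below) =====
def Claim_equal_rewrite_rpc_clients_to_direct : Prop := ∀ (text : String), Dom_rewrite_rpc_clients_to_direct text → Spec_rewrite_rpc_clients_to_direct text (rewrite_rpc_clients_to_direct text)

-- ===== LEMMAS AND PROOFS =====

-- the grandchild-skip predicate
def skipP (g : String) : Bool := g == "" || PySem.Str.startswith g "    "

-- the Etcd-filtered body (specification of both inner loops' kept lines)
def filt : List String → List String
  | [] => []
  | line :: rest =>
    if PySem.Str.startswith line "  Etcd:" then filt (rest.dropWhile skipP)
    else line :: filt rest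
termination_by l => l.length
decreasing_by
  · exact Nat.lt_succ_of_le (List.length_dropWhile_le _ _)
  · exact Nat.lt_succ_self _

-- the insertion position inside the filtered body
def posOf : List String → Option Nat
  | [] => none
  | line :: rest =>
    if PySem.Str.startswith line "  Etcd:" then some 0
    else if PySem.Str.startswith (PySem.Str.strip line) "Timeout:" then some 0
    else (posOf rest).map (· + 1)

theorem startswith_mono (s p q : String) (hpq : PySem.Str.startswith p q = true)
    (h : PySem.Str.startswith s p = true) : PySem.Str.startswith s q = true := by
  simp only [PySem.Str.startswith_eq] at *
  rw [PySem.Chars.startswith_iff] at *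
  exact hpq.trans h

theorem skipP_inBody (g : String) (h : skipP g = true) : bInBody g = true := by
  simp only [skipP, Bool.or_eq_true] at h
  simp only [bInBody, Bool.or_eq_true]
  rcases h with h | h
  · exact Or.inl h
  · exact Or.inr (startswith_mono g "    " "  " (by decide) h)

theorem aSkipGrand_eq (l : List String) : aSkipGrand l = l.dropWhile skipP := by
  induction l with
  | nil => rfl
  | cons g rest ih =>
    by_cases h : g ≠ "" ∧ PySem.Str.startswith g "    " = false
    · have hs : skipP g = false := by
        simp only [skipP, Bool.or_eq_false_iff, beq_eq_false_iff_ne, ne_eq]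
        exact ⟨h.1, h.2⟩
      rw [aSkipGrand, if_pos h, List.dropWhile_cons, hs]
      simp
    · have hs : skipP g = true := by
        simp only [ne_eq, Decidable.not_and_iff_or_not, not_not, Bool.not_eq_false] at h
        rcases h with h | h
        · simp [skipP, h]
        · simp only [skipP, h, Bool.or_true]
      rw [aSkipGrand, if_neg h, List.dropWhile_cons, hs]
      simp [ih]

theorem dropWhile_takeWhile_comm (l : List String) :
    (l.takeWhile bInBody).dropWhile skipP = (l.dropWhile skipP).takeWhile bInBody := by
  induction l with
  | nil => rfl
  | cons g rest ih =>
    cases hs : skipP g with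
    | true =>
      simp [skipP_inBody g hs, hs, ih]
    | false =>
      cases hb : bInBody g with
      | true => simp [hb, hs]
      | false => simp [hb, hs]

theorem dropWhile_inBody_skip (l : List String) :
    (l.dropWhile skipP).dropWhile bInBody = l.dropWhile bInBody := by
  induction l with
  | nil => rfl
  | cons g rest ih =>
    cases hs : skipP g with
    | true => simp [hs, skipP_inBody g hs, ih]
    | false => simp [List.dropWhile_cons, hs]

theorem aInner_true (ep : String) : ∀ (n : ℕ) (l : List String), l.length ≤ n →
    aInner ep true l = (filt (l.takeWhile bInBody), true, l.dropWhile bInBody) := by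
  intro n
  induction n with
  | zero =>
    intro l hl
    rw [List.eq_nil_of_length_eq_zero (Nat.le_zero.mp hl)]
    simp [aInner, filt]
  | succ n ih =>
    intro l hl
    match l with
    | [] => simp [aInner, filt]
    | child :: rest =>
      simp only [List.length_cons, Nat.add_le_add_iff_right] at hl
      by_cases hbrk : child ≠ "" ∧ PySem.Str.startswith child "  " = false
      · have hb : bInBody child = false := by
          simp only [bInBody, Bool.or_eq_false_iff, beq_eq_false_iff_ne, ne_eq]
          exact ⟨hbrk.1, hbrk.2⟩
        have htw : (child :: rest).takeWhile bInBody = [] := by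
          simp [hb]
        have hdw : (child :: rest).dropWhile bInBody = child :: rest := by
          simp [hb]
        rw [aInner, if_pos hbrk, htw, hdw, filt]
      · have hb : bInBody child = true := by
          simp only [ne_eq, Decidable.not_and_iff_or_not, not_not, Bool.not_eq_false] at hbrk
          rcases hbrk with h | h
          · simp [bInBody, h]
          · simp only [bInBody, h, Bool.or_true]
        have htw : (child :: rest).takeWhile bInBody = child :: rest.takeWhile bInBody := by
          simp [hb]
        have hdw : (child :: rest).dropWhile bInBody = rest.dropWhile bInBody := by
          simp [hb]
        by_cases het : PySem.Str.startswith child "  Etcd:" = true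
        · rw [aInner, if_neg hbrk, if_pos het, aSkipGrand_eq,
            ih _ (Nat.le_trans (List.length_dropWhile_le _ _) hl), htw, hdw]
          rw [filt, if_pos het, dropWhile_takeWhile_comm, dropWhile_inBody_skip]
          simp
        · rw [aInner, if_neg hbrk, if_neg het]
          simp only [Bool.true_eq_false, false_and, if_false, List.nil_append]
          rw [ih rest hl, htw, hdw, filt, if_neg het]
theorem aInner_false (ep : String) : ∀ (n : ℕ) (l : List String), l.length ≤ n →
    aInner ep false l =
      ((match posOf (l.takeWhile bInBody) with
        | none => filt (l.takeWhile bInBody)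
        | some k => (filt (l.takeWhile bInBody)).take k ++ ["  Endpoints:", "    - " ++ ep] ++
            (filt (l.takeWhile bInBody)).drop k),
       (posOf (l.takeWhile bInBody)).isSome,
       l.dropWhile bInBody) := by
  intro n
  induction n with
  | zero =>
    intro l hl
    rw [List.eq_nil_of_length_eq_zero (Nat.le_zero.mp hl)]
    simp [aInner, posOf, filt]
  | succ n ih =>
    intro l hl
    match l with
    | [] => simp [aInner, posOf, filt]
    | child :: rest =>
      simp only [List.length_cons, Nat.add_le_add_iff_right] at hl
      by_cases hbrk : child ≠ "" ∧ PySem.Str.startswith child "  " = false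
      · have hb : bInBody child = false := by
          simp only [bInBody, Bool.or_eq_false_iff, beq_eq_false_iff_ne, ne_eq]
          exact ⟨hbrk.1, hbrk.2⟩
        have htw : (child :: rest).takeWhile bInBody = [] := by
          simp [hb]
        have hdw : (child :: rest).dropWhile bInBody = child :: rest := by
          simp [hb]
        rw [aInner, if_pos hbrk, htw, hdw]
        simp [posOf, filt]
      · have hb : bInBody child = true := by
          simp only [ne_eq, Decidable.not_and_iff_or_not, not_not, Bool.not_eq_false] at hbrk
          rcases hbrk with h | h
          · simp [bInBody, h]
          · simp only [bInBody, h, Bool.or_true]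
        have htw : (child :: rest).takeWhile bInBody = child :: rest.takeWhile bInBody := by
          simp [hb]
        have hdw : (child :: rest).dropWhile bInBody = rest.dropWhile bInBody := by
          simp [hb]
        by_cases het : PySem.Str.startswith child "  Etcd:" = true
        · rw [aInner, if_neg hbrk, if_pos het, aSkipGrand_eq,
            aInner_true ep n _ (Nat.le_trans (List.length_dropWhile_le _ _) hl), htw, hdw]
          simp only [Bool.false_eq_true, if_false]
          rw [posOf, if_pos het, filt, if_pos het, dropWhile_takeWhile_comm, dropWhile_inBody_skip]
          simp
        · by_cases hto : PySem.Str.startswith (PySem.Str.strip child) "Timeout:" = true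
          · have hhit : false = false ∧ PySem.Str.startswith (PySem.Str.strip child) "Timeout:" = true :=
              ⟨rfl, hto⟩
            rw [aInner, if_neg hbrk, if_neg het]
            simp only [true_and]
            rw [if_pos hto, if_pos hto]
            rw [aInner_true ep n rest hl, htw, hdw, posOf, if_neg het, if_pos hto, filt, if_neg het]
            simp
          · have hhit : ¬ (false = false ∧ PySem.Str.startswith (PySem.Str.strip child) "Timeout:" = true) :=
              fun h => hto h.2
            rw [aInner, if_neg hbrk, if_neg het]
            simp only [true_and]
            rw [if_neg hto, if_neg hto]
            rw [ih rest hl, htw, hdw, posOf, if_neg het, if_neg hto, filt, if_neg het]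
            cases hp : posOf (rest.takeWhile bInBody) with
            | none => simp
            | some k => simp [List.take_succ_cons, List.drop_succ_cons]

theorem bFilterLoop_eq : ∀ (n : ℕ) (l filtered : List String) (pos : Option ℕ), l.length ≤ n →
    bFilterLoop l filtered pos =
      (filtered ++ filt l,
       match pos with
       | some k => some k
       | none => (posOf l).map (· + filtered.length)) := by
  intro n
  induction n with
  | zero =>
    intro l filtered pos hl
    rw [List.eq_nil_of_length_eq_zero (Nat.le_zero.mp hl)]
    cases pos <;> simp [bFilterLoop, filt, posOf]
  | succ n ih =>
    intro l filtered pos hl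
    match l with
    | [] => cases pos <;> simp [bFilterLoop, filt, posOf]
    | line :: rest =>
      simp only [List.length_cons, Nat.add_le_add_iff_right] at hl
      have hskip : (fun g => g == "" || PySem.Str.startswith g "    ") = skipP := rfl
      by_cases het : PySem.Str.startswith line "  Etcd:" = true
      · rw [bFilterLoop, if_pos het, hskip]
        cases pos with
        | some k =>
          simp only [Option.isNone_some, Bool.false_eq_true, if_false]
          rw [ih _ _ _ (Nat.le_trans (List.length_dropWhile_le _ _) hl),
            filt, if_pos het]
        | none =>
          simp only [Option.isNone_none, if_true]
          rw [ih _ _ _ (Nat.le_trans (List.length_dropWhile_le _ _) hl),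
            filt, if_pos het, posOf, if_pos het]
          simp
      · rw [bFilterLoop, if_neg het]
        cases pos with
        | some k =>
          simp only [Option.isNone_some, Bool.false_eq_true, false_and, if_false]
          rw [ih rest _ _ hl, filt, if_neg het]
          simp
        | none =>
          simp only [Option.isNone_none, true_and]
          by_cases hto : PySem.Str.startswith (PySem.Str.strip line) "Timeout:" = true
          · rw [if_pos hto, ih rest _ _ hl, filt, if_neg het, posOf, if_neg het, if_pos hto]
            simp
          · rw [if_neg hto, ih rest _ _ hl, filt, if_neg het, posOf, if_neg het, if_neg hto]
            cases hp : posOf rest with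
            | none => simp
            | some k =>
              simp [List.length_append]
              omega

theorem bTransform_eq (body : List String) (ep : String) :
    bTransform body ep =
      (match posOf body with
       | none => filt body ++ ["  Endpoints:", "    - " ++ ep]
       | some k => (filt body).take k ++ ["  Endpoints:", "    - " ++ ep] ++ (filt body).drop k) := by
  rw [bTransform, bFilterLoop_eq body.length body [] none (Nat.le_refl _)]
  cases hp : posOf body with
  | none => simp [List.take_length, List.drop_length]
  | some k => simp

theorem outer_eq : ∀ (n : ℕ) (l : List String), l.length ≤ n → aOuter l = bEmit (bSegments l) := by
  intro n
  induction n with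
  | zero =>
    intro l hl
    rw [List.eq_nil_of_length_eq_zero (Nat.le_zero.mp hl)]
    simp [aOuter, bSegments, bEmit]
  | succ n ih =>
    intro l hl
    match l with
    | [] => simp [aOuter, bSegments, bEmit]
    | line :: rest =>
      simp only [List.length_cons, Nat.add_le_add_iff_right] at hl
      have hiff : (bIsHeader line = true) ↔
          (PySem.Str.endswith (PySem.Str.strip line) ":" = true ∧
           (pvDirect.get? (PySem.Str.slice (PySem.Str.strip line) none (some (-1)))).isSome = true ∧
           PySem.Str.startswith line " " = false) := by
        simp only [bIsHeader, Bool.and_eq_true, Bool.not_eq_true']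
        exact ⟨fun h => ⟨h.1.2, h.2, h.1.1⟩, fun h => ⟨⟨h.2.2, h.1⟩, h.2.1⟩⟩
      by_cases hh : (PySem.Str.endswith (PySem.Str.strip line) ":" = true ∧
           (pvDirect.get? (PySem.Str.slice (PySem.Str.strip line) none (some (-1)))).isSome = true ∧
           PySem.Str.startswith line " " = false)
      · have hbh : bIsHeader line = true := hiff.mpr hh
        rw [aOuter]
        simp only [if_pos hh]
        rw [bSegments, if_pos hbh, bEmit,
          aInner_false _ rest.length rest (Nat.le_refl _), bTransform_eq]
        cases hp : posOf (rest.takeWhile bInBody) with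
        | none =>
          simp only [Option.isSome_none, Bool.false_eq_true, if_false]
          rw [ih _ (Nat.le_trans (List.length_dropWhile_le _ _) hl)]
          simp
        | some k =>
          simp only [Option.isSome_some, if_true]
          rw [ih _ (Nat.le_trans (List.length_dropWhile_le _ _) hl)]
          simp
      · have hbh : ¬ bIsHeader line = true := fun h => hh (hiff.mp h)
        rw [aOuter]
        simp only [if_neg hh]
        rw [bSegments, if_neg hbh, bEmit, ih rest hl]

-- ===== VERDICT (by name: the statement is the Claim_ definition above) =====
theorem rewrite_rpc_clients_to_direct_spec : Claim_equal_rewrite_rpc_clients_to_direct := by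
  intro text _
  unfold Spec_rewrite_rpc_clients_to_direct rewrite_rpc_clients_to_direct rewrite_rpc_clients_to_direct_alt
  rw [outer_eq (PySem.Str.splitlines text).length _ (Nat.le_refl _)]
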